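-- pv_equiv track=rewrite | github.com/fzimmermann89/msc | phase27.py | fastlen
-- ===== SOURCE A (Python) =====
-- def fastlen(length):
--     fast = [2,     4,     6,     8,    10,    12,    16,    18,    20,
--            24,    30,    32,    36,    40,    48,    50,    54,    60,
--            64,    72,    80,    90,    96,   100,   108,   120,   128,
--           144,   150,   160,   162,   180,   192,   200,   216,   240,
--           250,   256,   270,   288,   300,   320,   324,   360,   384,
--           400,   432,   450,   480,   486,   500,   512,   540,   576,
--           600,   640,   648,   720,   750,   768,   800,   810,   864,
--           900,   960,   972,  1000,  1024,  1080,  1152,  1200,  1250,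
--          1280,  1296,  1350,  1440,  1458,  1500,  1536,  1600,  1620,
--          1728,  1800,  1920,  1944,  2000,  2048,  2160,  2250,  2304,
--          2400,  2430,  2500,  2560,  2592,  2700,  2880,  2916,  3000,
--          3072,  3200,  3240,  3456,  3600,  3750,  3840,  3888,  4000,
--          4050,  4096,  4320,  4374,  4500,  4608,  4800,  4860,  5000,
--          5120,  5184,  5400,  5760,  5832,  6000,  6144,  6250,  6400,
--          6480,  6750,  6912,  7200,  7290,  7500,  7680,  7776,  8000,
--          8100,  8192,  8640,  8748,  9000,  9216,  9600,  9720, 10000]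
--     for l in fast:
--         if l>=length:
--             return l
--     return length
-- ===== SOURCE B (Python) =====
-- def fastlen(length):
--     # The precomputed table is exactly the even 5-smooth numbers (2**a * 3**b * 5**c,
--     # a >= 1) up to 10000: generate them on the fly and keep the smallest one >= length.
--     if length > 10000:
--         return length
--     best = None
--     p2 = 2
--     while p2 <= 10000:
--         p23 = p2
--         while p23 <= 10000:
--             v = p23
--             while v <= 10000:
--                 if v >= length and (best is None or v < best):
--                     best = v
--                 v *= 5
--             p23 *= 3
--         p2 *= 2
--     return best
-- ===== Notes on version B (the rewrite author's own statement) =====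
-- stated objective: alternative
-- what changed: B drops the 144-entry lookup table entirely: it generates the table's contents - the even 5-smooth numbers 2^a*3^b*5^c (a>=1) up to 10000 - with three nested multiplication loops and keeps the smallest generated candidate >= length, falling back to length itself above 10000.
import Mathlib
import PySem

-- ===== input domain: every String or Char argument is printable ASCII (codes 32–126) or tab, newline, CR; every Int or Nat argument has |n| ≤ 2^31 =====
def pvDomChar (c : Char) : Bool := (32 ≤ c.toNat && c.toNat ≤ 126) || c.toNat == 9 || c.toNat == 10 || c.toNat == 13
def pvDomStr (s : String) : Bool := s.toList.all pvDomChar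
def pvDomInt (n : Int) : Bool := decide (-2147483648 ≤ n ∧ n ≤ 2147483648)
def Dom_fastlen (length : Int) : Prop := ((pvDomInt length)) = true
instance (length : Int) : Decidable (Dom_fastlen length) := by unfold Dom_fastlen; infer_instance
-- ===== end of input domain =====

-- B drops A's 144-entry lookup table entirely and generates its contents — the even
-- 5-smooth numbers 2^a·3^b·5^c (a ≥ 1) up to 10000 — with three nested loops, keeping
-- the smallest candidate ≥ length (objective: alternative; no speed claim).

-- ===== PORT A =====
-- A's literal table
def fastList : List Int := [2, 4, 6, 8, 10, 12, 16, 18, 20, 24, 30, 32, 36, 40, 48, 50, 54, 60, 64, 72, 80, 90, 96, 100, 108, 120, 128, 144, 150, 160, 162, 180, 192, 200, 216, 240, 250, 256, 270, 288, 300, 320, 324, 360, 384, 400, 432, 450, 480, 486, 500, 512, 540, 576, 600, 640, 648, 720, 750, 768, 800, 810, 864, 900, 960, 972, 1000, 1024, 1080, 1152, 1200, 1250, 1280, 1296, 1350, 1440, 1458, 1500, 1536, 1600, 1620, 1728, 1800, 1920, 1944, 2000, 2048, 2160, 2250, 2304, 2400, 2430, 2500, 2560, 2592, 2700, 2880, 2916,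 3000, 3072, 3200, 3240, 3456, 3600, 3750, 3840, 3888, 4000, 4050, 4096, 4320, 4374, 4500, 4608, 4800, 4860, 5000, 5120, 5184, 5400, 5760, 5832, 6000, 6144, 6250, 6400, 6480, 6750, 6912, 7200, 7290, 7500, 7680, 7776, 8000, 8100, 8192, 8640, 8748, 9000, 9216, 9600, 9720, 10000]

-- A's 'for l in fast: if l >= length: return l' loop, followed by 'return length'
def scanA (xs : List Int) (length : Int) : Int :=
  match xs with
  | [] => length
  | l :: ls => if l ≥ length then l else scanA ls length

def fastlen (length : Int) : Int := scanA fastList length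

-- ===== PORT B =====
-- Source B's update of `best` inside the innermost loop:
-- 'if v >= length and (best is None or v < best): best = v'
def stepB (t v : Int) (best : Option Int) : Option Int :=
  if t ≤ v then
    match best with
    | none => some v
    | some m => if v < m then some v else best
  else best

-- Source B's three while-loops. Python's loops terminate because the running value at least
-- doubles each iteration; here that is made structural with a fuel argument (20 is far
-- more than the ≤ 13 iterations any of the loops can make starting from 2), so the
-- guard `v ≤ 10000` is always reached before the fuel runs out — the computation is
-- exactly the Python one.
def loop5 (fuel : Nat) (t v : Int) (best : Option Int) : Option Int :=
  match fuel with
  | 0 => best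
  | n + 1 => if v ≤ 10000 then loop5 n t (v * 5) (stepB t v best) else best

def loop3 (fuel : Nat) (t p23 : Int) (best : Option Int) : Option Int :=
  match fuel with
  | 0 => best
  | n + 1 => if p23 ≤ 10000 then loop3 n t (p23 * 3) (loop5 20 t p23 best) else best

def loop2 (fuel : Nat) (t p2 : Int) (best : Option Int) : Option Int :=
  match fuel with
  | 0 => best
  | n + 1 => if p2 ≤ 10000 then loop2 n t (p2 * 2) (loop3 20 t p2 best) else best

def fastlen_alt (length : Int) : Int :=
  if length > 10000 then length
  else
    -- Source B returns `best`, which is never None here (10000 itself is a candidate);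
    -- the `none` branch is unreachable
    match loop2 20 length 2 none with
    | some b => b
    | none => 0

-- ===== PRECONDITION & SPEC =====
def Spec_fastlen (length : Int) (out : Int) : Prop := out = fastlen_alt length
instance (length : Int) (out : Int) : Decidable (Spec_fastlen length out) := by unfold Spec_fastlen; infer_instance

-- ===== CLAIM =====
def Claim_equal_fastlen : Prop := ∀ (length : Int), Dom_fastlen length → Spec_fastlen length (fastlen length)

-- ===== LEMMAS AND PROOFS =====

-- candidate lists traversed by B's loops (same fuel pattern, t-independent)
def cands5 (fuel : Nat) (v : Int) : List Int :=
  match fuel with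
  | 0 => []
  | n + 1 => if v ≤ 10000 then v :: cands5 n (v * 5) else []

def cands3 (fuel : Nat) (p : Int) : List Int :=
  match fuel with
  | 0 => []
  | n + 1 => if p ≤ 10000 then cands5 20 p ++ cands3 n (p * 3) else []

def cands2 (fuel : Nat) (p : Int) : List Int :=
  match fuel with
  | 0 => []
  | n + 1 => if p ≤ 10000 then cands3 20 p ++ cands2 n (p * 2) else []

-- option-valued min, the abstract effect of stepB
def omin : Option Int → Option Int → Option Int
  | none, b => b
  | some m, none => some m
  | some m, some k => some (min m k)

lemma stepB_eq (t v : Int) (b : Option Int) :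
    stepB t v b = if t ≤ v then omin b (some v) else b := by
  cases b with
  | none => by_cases h : t ≤ v <;> simp [stepB, omin, h]
  | some m =>
    by_cases h : t ≤ v
    · by_cases h2 : v < m
      · have : min m v = v := by omega
        simp [stepB, omin, h, h2, this]
      · have : min m v = m := by omega
        simp [stepB, omin, h, h2, this]
    · simp [stepB, h]

lemma omin_assoc (a b c : Option Int) : omin (omin a b) c = omin a (omin b c) := by
  cases a <;> cases b <;> cases c <;> simp [omin, min_assoc]

lemma foldl_min_eq (ys : List Int) : ∀ a y : Int,
    List.foldl min (min a y) ys = min a (List.foldl min y ys) := by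
  induction ys with
  | nil => intro a y; rfl
  | cons z ys ih =>
    intro a y
    simp only [List.foldl_cons, min_assoc, ih]

lemma min?_cons (v : Int) (xs : List Int) :
    (v :: xs).min? = omin (some v) xs.min? := by
  cases xs with
  | nil => rfl
  | cons y ys => simp [List.min?, omin, foldl_min_eq]

-- B's fold computes the option-min of the ≥ t elements
lemma foldl_stepB (t : Int) : ∀ (l : List Int) (b : Option Int),
    List.foldl (fun b v => stepB t v b) b l = omin b ((l.filter (fun x => t ≤ x)).min?) := by
  intro l
  induction l with
  | nil => intro b; cases b <;> rfl
  | cons v l ih =>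
    intro b
    rw [List.foldl_cons, ih, stepB_eq, List.filter_cons]
    by_cases h : t ≤ v
    · rw [if_pos h]
      simp only [h, decide_true, if_pos]
      rw [min?_cons, ← omin_assoc]
    · rw [if_neg h]
      simp only [h, decide_false, Bool.false_eq_true, if_neg, not_false_iff]

-- the loops are folds of stepB over their candidate lists
lemma loop5_eq (t : Int) : ∀ (n : Nat) (v : Int) (b : Option Int),
    loop5 n t v b = List.foldl (fun b v => stepB t v b) b (cands5 n v) := by
  intro n
  induction n with
  | zero => intro v b; rfl
  | succ n ih =>
    intro v b
    rw [loop5, cands5]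
    by_cases h : v ≤ 10000 <;> simp [h, ih]

lemma loop3_eq (t : Int) : ∀ (n : Nat) (p : Int) (b : Option Int),
    loop3 n t p b = List.foldl (fun b v => stepB t v b) b (cands3 n p) := by
  intro n
  induction n with
  | zero => intro p b; rfl
  | succ n ih =>
    intro p b
    rw [loop3, cands3]
    by_cases h : p ≤ 10000 <;> simp [h, ih, loop5_eq, List.foldl_append]

lemma loop2_eq (t : Int) : ∀ (n : Nat) (p : Int) (b : Option Int),
    loop2 n t p b = List.foldl (fun b v => stepB t v b) b (cands2 n p) := by
  intro n
  induction n with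
  | zero => intro p b; rfl
  | succ n ih =>
    intro p b
    rw [loop2, cands2]
    by_cases h : p ≤ 10000 <;> simp [h, ih, loop3_eq, List.foldl_append]

-- the generated candidates are a permutation of A's table
set_option maxRecDepth 40000 in
lemma cands_perm : (cands2 20 2).Perm fastList := by decide

lemma min?_perm {l1 l2 : List Int} (h : l1.Perm l2) : l1.min? = l2.min? := by
  cases h2 : l2.min? with
  | none =>
    rw [List.min?_eq_none_iff] at h2
    subst h2
    rw [List.min?_eq_none_iff]
    exact h.eq_nil
  | some a =>
    rw [List.min?_eq_some_iff] at h2 ⊢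
    exact ⟨h.mem_iff.mpr h2.1, fun b hb => h2.2 b (h.mem_iff.mp hb)⟩

lemma foldl_min_le (l : List Int) : ∀ x : Int, (h : ∀ y ∈ l, x ≤ y) → List.foldl min x l = x := by
  induction l with
  | nil => intro x _; rfl
  | cons y ys ih =>
    intro x h
    have hx : x ≤ y := h y (by simp)
    simp only [List.foldl_cons, min_eq_left hx]
    exact ih x (fun z hz => h z (by simp [hz]))

-- A's scan on a sorted list is the min of its ≥ t elements (default t)
lemma scanA_eq_min (t : Int) : ∀ (xs : List Int), xs.Pairwise (· ≤ ·) →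
    scanA xs t = ((xs.filter (fun x => t ≤ x)).min?).getD t := by
  intro xs
  induction xs with
  | nil => intro _; rfl
  | cons x ls ih =>
    intro hp
    rw [List.pairwise_cons] at hp
    rw [scanA, List.filter_cons]
    by_cases h : t ≤ x
    · have hle : ∀ y ∈ ls.filter (fun x => t ≤ x), x ≤ y :=
        fun y hy => hp.1 y (List.mem_of_mem_filter hy)
      simp only [h, decide_true, if_pos, List.min?]
      rw [foldl_min_le _ x hle]
      rfl
    · have : ¬ x ≥ t := h
      simp only [h, decide_false, if_neg, Bool.false_eq_true, not_false_iff]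
      exact ih hp.2

set_option maxRecDepth 8000 in
lemma fastList_sorted : fastList.Pairwise (· ≤ ·) := by
  unfold fastList; decide

set_option maxRecDepth 8000 in
lemma fastList_le : ∀ l ∈ fastList, l ≤ 10000 := by decide

set_option maxRecDepth 8000 in
lemma mem_fastList_10000 : (10000 : Int) ∈ fastList := by decide

lemma scanA_big (t : Int) : ∀ (xs : List Int), (∀ l ∈ xs, l < t) → scanA xs t = t := by
  intro xs
  induction xs with
  | nil => intro _; rfl
  | cons x ls ih =>
    intro h
    have hx : ¬ x ≥ t := by have := h x (by simp); omega
    rw [scanA, if_neg hx]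
    exact ih (fun l hl => h l (by simp [hl]))

-- ===== VERDICT =====
theorem fastlen_spec : Claim_equal_fastlen := by
  intro t _
  unfold Spec_fastlen fastlen fastlen_alt
  by_cases hbig : t > 10000
  · rw [if_pos hbig]
    exact scanA_big t fastList (fun l hl => by have := fastList_le l hl; omega)
  · rw [if_neg hbig]
    rw [loop2_eq, foldl_stepB]
    have hperm := (cands_perm.filter (fun x => t ≤ x))
    rw [min?_perm hperm]
    have hmem : (10000 : Int) ∈ fastList.filter (fun x => t ≤ x) := by
      rw [List.mem_filter]
      exact ⟨mem_fastList_10000, by simp; omega⟩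
    cases hm : (fastList.filter (fun x => t ≤ x)).min? with
    | none =>
      rw [List.min?_eq_none_iff] at hm
      rw [hm] at hmem
      exact absurd hmem (List.not_mem_nil)
    | some m =>
      rw [scanA_eq_min t fastList fastList_sorted, hm]
      rfl
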